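-- pv_equiv track=rewrite | github.com/ojuaf/aoc-2024 | day07/sol.py | next_operation
-- ===== SOURCE A (Python) =====
-- def next_operation(value, remaining, expected):
--     result = False
--     if value > expected:
--         pass
--     elif not remaining:
--         if value == expected:
--             result = True
--     else:
--         nex_value_add = value + remaining[0]
--         result |= next_operation(nex_value_add, remaining[1:], expected)
--         nex_value_mult = value * remaining[0]
--         result |= next_operation(nex_value_mult, remaining[1:], expected)
--     return result
-- ===== SOURCE B (Python) =====
-- def next_operation(value, remaining, expected):
--     cur = {value}
--     for n in remaining:
--         cur = {r for v in cur if v <= expected for r in (v + n, v * n)}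
--     return expected in cur
-- ===== Notes on version B (the rewrite author's own statement) =====
-- stated objective: alternative
-- what changed: Replaces A's exponential binary recursion over +/* choices with an iterative level-by-level set of reachable values (pruned at > expected), checking membership of expected at the end; deduplication collapses equal intermediate values but worst-case cost is similar.
import Mathlib
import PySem

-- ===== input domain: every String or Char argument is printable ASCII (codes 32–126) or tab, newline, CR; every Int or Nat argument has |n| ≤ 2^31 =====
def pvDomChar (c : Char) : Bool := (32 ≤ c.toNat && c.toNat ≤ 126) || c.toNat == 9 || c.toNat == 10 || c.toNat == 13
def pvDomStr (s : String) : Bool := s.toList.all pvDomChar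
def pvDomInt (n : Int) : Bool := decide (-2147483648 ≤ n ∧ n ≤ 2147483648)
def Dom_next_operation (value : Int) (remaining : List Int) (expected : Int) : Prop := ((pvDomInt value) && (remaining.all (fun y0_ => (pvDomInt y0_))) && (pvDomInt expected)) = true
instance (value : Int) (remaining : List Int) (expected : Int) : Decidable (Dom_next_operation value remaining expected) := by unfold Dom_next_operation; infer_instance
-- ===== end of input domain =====

-- B replaces A's branching recursion over +/* choices by an iterative breadth-first set of reachable values (pruned at > expected); return value only, same results.

-- ===== PORT A =====
def next_operation (value : Int) (remaining : List Int) (expected : Int) : Bool :=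
  if value > expected then false
  else
    match remaining with
    | [] => value == expected
    | r :: rest =>
      next_operation (value + r) rest expected || next_operation (value * r) rest expected

-- ===== PORT B =====
-- one step of the set comprehension {r for v in cur if v <= expected for r in (v+n, v*n)}
def pvLevelStep (expected : Int) (cur : PySem.Set Int) (n : Int) : PySem.Set Int :=
  PySem.Set.ofList ((cur.filter (fun v => v ≤ expected)).flatMap (fun v => [v + n, v * n]))

def next_operation_alt (value : Int) (remaining : List Int) (expected : Int) : Bool :=
  let cur : PySem.Set Int := PySem.Set.ofList [value]
  let cur := remaining.foldl (pvLevelStep expected) cur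
  PySem.Set.contains cur expected

-- ===== PRECONDITION & SPEC =====
def Spec_next_operation (value : Int) (remaining : List Int) (expected : Int) (out : Bool) : Prop := out = next_operation_alt value remaining expected
instance (value : Int) (remaining : List Int) (expected : Int) (out : Bool) : Decidable (Spec_next_operation value remaining expected out) := by unfold Spec_next_operation; infer_instance

-- ===== CLAIM (what is proved, stated in full; the proofs are below) =====
def Claim_equal_next_operation : Prop := ∀ (value : Int) (remaining : List Int) (expected : Int), Dom_next_operation value remaining expected → Spec_next_operation value remaining expected (next_operation value remaining expected)

-- ===== LEMMAS AND PROOFS =====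

lemma mem_pvLevelStep (expected n w : Int) (S : List Int) :
    w ∈ pvLevelStep expected S n ↔ ∃ v ∈ S, v ≤ expected ∧ (w = v + n ∨ w = v * n) := by
  simp [pvLevelStep, PySem.Set.mem_ofList, List.mem_flatMap, List.mem_filter]
  constructor
  · rintro ⟨v, ⟨hv, hle⟩, hw⟩
    exact ⟨v, hv, by simpa using hle, by tauto⟩
  · rintro ⟨v, hv, hle, hw⟩
    exact ⟨v, ⟨hv, by simpa using hle⟩, by tauto⟩

lemma next_operation_nil (v exp : Int) : next_operation v [] exp = true ↔ v = exp := by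
  unfold next_operation
  split_ifs with h
  · simp; omega
  · simp

lemma main_invariant (rem : List Int) (exp : Int) :
    ∀ S : List Int, (∃ v ∈ S, next_operation v rem exp = true) ↔
      exp ∈ rem.foldl (pvLevelStep exp) S := by
  induction rem with
  | nil =>
    intro S
    simp only [List.foldl_nil]
    constructor
    · rintro ⟨v, hv, h⟩; rwa [(next_operation_nil v exp).mp h] at hv
    · intro h; exact ⟨exp, h, (next_operation_nil exp exp).mpr rfl⟩
  | cons n rest ih =>
    intro S
    rw [List.foldl_cons, ← ih (pvLevelStep exp S n)]
    constructor
    · rintro ⟨v, hv, h⟩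
      rw [next_operation] at h
      by_cases hgt : v > exp
      · simp [hgt] at h
      · rw [if_neg hgt] at h
        simp only [Bool.or_eq_true] at h
        rcases h with h | h
        · exact ⟨v + n, (mem_pvLevelStep exp n _ S).mpr ⟨v, hv, by omega, Or.inl rfl⟩, h⟩
        · exact ⟨v * n, (mem_pvLevelStep exp n _ S).mpr ⟨v, hv, by omega, Or.inr rfl⟩, h⟩
    · rintro ⟨w, hw, h⟩
      rcases (mem_pvLevelStep exp n w S).mp hw with ⟨v, hv, hle, hcase⟩
      refine ⟨v, hv, ?_⟩
      unfold next_operation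
      split_ifs with hgt
      · omega
      · rcases hcase with rfl | rfl <;> simp [h]

lemma contains_iff (S : List Int) (x : Int) : PySem.Set.contains S x = true ↔ x ∈ S := by
  simp [PySem.Set.contains]

-- ===== VERDICT (by name: the statement is the Claim_ definition above) =====
theorem next_operation_spec : Claim_equal_next_operation := by
  intro value remaining expected _
  unfold Spec_next_operation next_operation_alt
  have h := main_invariant remaining expected (PySem.Set.ofList [value])
  have hS : (∃ v ∈ PySem.Set.ofList ([value] : List Int), next_operation v remaining expected = true)
      ↔ next_operation value remaining expected = true := by
    simp [PySem.Set.mem_ofList]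
  rw [hS] at h
  by_cases hb : next_operation value remaining expected = true
  · rw [hb]; exact ((contains_iff _ _).mpr (h.mp hb)).symm
  · simp only [Bool.not_eq_true] at hb
    rw [hb]
    symm
    rw [Bool.eq_false_iff, Ne, contains_iff]
    intro hmem
    rw [← h] at hmem
    simp [hb] at hmem
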